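-- pv_equiv track=rewrite | github.com/lalit527/DS | Sequence7/codechef/1-array/cops.py | check_safe_house
-- ===== SOURCE A (Python) =====
-- def check_safe_house(data, x, y):
--   houses = [-1] * 101
--   coverage = x * y
--   result = 0
--   for i in data:
--     l = max(1, i - coverage)
--     u = min(100, i + coverage)
--     for i in range(l, u + 1):
--       houses[i] = 1
--
--   count = 0
--   for i in range(1, 101):
--     if houses[i] == -1:
--       count += 1
--   return count
-- ===== SOURCE B (Python) =====
-- def check_safe_house(data, x, y):
--     coverage = x * y
--     diff = [0] * 102
--     for i in data:
--         l = max(1, i - coverage)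
--         u = min(100, i + coverage)
--         if l <= u:
--             diff[l] += 1
--             diff[u + 1] -= 1
--     count = 0
--     cov = 0
--     for p in range(1, 101):
--         cov += diff[p]
--         if cov == 0:
--             count += 1
--     return count
-- ===== Notes on version B (the rewrite author's own statement) =====
-- stated objective: faster
-- what changed: Replaces per-cop marking of every covered house (inner range loop writing into a boolean array) with a difference array updated in O(1) per cop plus one prefix-sum sweep over positions 1..100 counting zero coverage.
import Mathlib
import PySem

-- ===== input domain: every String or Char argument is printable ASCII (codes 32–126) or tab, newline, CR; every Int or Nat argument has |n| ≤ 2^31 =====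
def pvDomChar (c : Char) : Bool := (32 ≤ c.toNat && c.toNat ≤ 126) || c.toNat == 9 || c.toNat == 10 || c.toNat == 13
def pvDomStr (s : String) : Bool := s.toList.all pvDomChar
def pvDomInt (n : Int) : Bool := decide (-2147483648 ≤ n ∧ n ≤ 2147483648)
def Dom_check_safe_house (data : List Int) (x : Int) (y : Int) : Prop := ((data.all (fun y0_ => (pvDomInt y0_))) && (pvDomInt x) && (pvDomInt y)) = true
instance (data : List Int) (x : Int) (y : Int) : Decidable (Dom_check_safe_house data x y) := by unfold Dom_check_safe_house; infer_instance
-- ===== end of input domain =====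

-- B replaces A's per-cop marking of every covered house by O(1) difference-array
-- updates plus one prefix-sum sweep (objective: faster, constant factor).

-- ===== PORT A =====
-- inner loop 'for i in range(l, u+1): houses[i] = 1' (indices are in range, so pySetD is exact)
def aMark (houses : List Int) (l u : Int) : List Int :=
  (PySem.List.pyRange l (u + 1) 1).foldl (fun h i => PySem.List.pySetD h i 1) houses

def check_safe_house (data : List Int) (x : Int) (y : Int) : Int :=
  let coverage := x * y
  let houses := data.foldl
    (fun h i => aMark h (max 1 (i - coverage)) (min 100 (i + coverage)))
    (List.replicate 101 (-1))
  (PySem.List.pyRange 1 101 1).foldl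
    (fun count i => if PySem.List.pyGetD houses i 0 = -1 then count + 1 else count) 0

-- ===== PORT B =====
-- 'if l <= u: diff[l] += 1; diff[u+1] -= 1' (indices are in range, so pyGetD/pySetD are exact)
def bStep (c : Int) (d : List Int) (i : Int) : List Int :=
  let l := max 1 (i - c)
  let u := min 100 (i + c)
  if l ≤ u then
    let d1 := PySem.List.pySetD d l (PySem.List.pyGetD d l 0 + 1)
    PySem.List.pySetD d1 (u + 1) (PySem.List.pyGetD d1 (u + 1) 0 - 1)
  else d

def check_safe_house_alt (data : List Int) (x : Int) (y : Int) : Int :=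
  let coverage := x * y
  let diff := data.foldl (bStep coverage) (List.replicate 102 0)
  let r := (PySem.List.pyRange 1 101 1).foldl
    (fun st p =>
      let cov := st.2 + PySem.List.pyGetD diff p 0
      (if cov = 0 then st.1 + 1 else st.1, cov)) ((0 : Int), (0 : Int))
  r.1

-- ===== PRECONDITION & SPEC =====
def Spec_check_safe_house (data : List Int) (x : Int) (y : Int) (out : Int) : Prop := out = check_safe_house_alt data x y
instance (data : List Int) (x : Int) (y : Int) (out : Int) : Decidable (Spec_check_safe_house data x y out) := by unfold Spec_check_safe_house; infer_instance

-- ===== CLAIM (what is proved, stated in full; the proofs are below) =====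
def Claim_equal_check_safe_house : Prop := ∀ (data : List Int) (x : Int) (y : Int), Dom_check_safe_house data x y → Spec_check_safe_house data x y (check_safe_house data x y)

-- ===== LEMMAS AND PROOFS =====

-- is house position p covered by some cop in data (coverage radius c)?
def covered (c : Int) (data : List Int) (p : Int) : Bool :=
  data.any fun i => decide (max 1 (i - c) ≤ p ∧ p ≤ min 100 (i + c))

-- number of cops covering p
def covCnt (c : Int) (data : List Int) (p : Int) : Nat :=
  data.countP fun i => decide (max 1 (i - c) ≤ p ∧ p ≤ min 100 (i + c))

lemma foldl_pySetD_length (xs : List Int) :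
    ∀ (h : List Int), (xs.foldl (fun h i => PySem.List.pySetD h i (1 : Int)) h).length = h.length := by
  induction xs with
  | nil => intro h; rfl
  | cons a t ih => intro h; simp only [List.foldl_cons]; rw [ih]; exact PySem.List.length_pySetD ..

lemma aMark_length (h : List Int) (l u : Int) : (aMark h l u).length = h.length := by
  unfold aMark; exact foldl_pySetD_length _ h

lemma aMark_getD_aux (p : Nat) :
    ∀ (n : Nat) (l u : Int), n = (u + 1 - l).toNat → 1 ≤ l →
    ∀ (h : List Int), u < (h.length : Int) →
      (aMark h l u).getD p 0
        = if l ≤ (p : Int) ∧ (p : Int) ≤ u then 1 else h.getD p 0 := by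
  intro n
  induction n with
  | zero =>
    intro l u hn hl h hu
    unfold aMark
    rw [PySem.List.pyRange_one_eq_nil (by omega)]
    simp only [List.foldl_nil]
    rw [if_neg (by omega)]
  | succ n ih =>
    intro l u hn hl h hu
    have hlu : l ≤ u := by omega
    unfold aMark
    rw [PySem.List.pyRange_one_cons (by omega : l < u + 1)]
    simp only [List.foldl_cons]
    have step := ih (l + 1) u (by omega) (by omega) (PySem.List.pySetD h l 1)
      (by rw [PySem.List.length_pySetD]; exact hu)
    unfold aMark at step
    rw [step, PySem.List.pySetD_of_nonneg _ _ (by omega : (0:Int) ≤ l)]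
    by_cases hp : (p : Int) = l
    · have hpl : l.toNat = p := by omega
      rw [if_neg (by omega), if_pos (by omega), hpl,
        List.getD_eq_getElem?_getD, List.getElem?_set_self (by omega)]
      rfl
    · by_cases hq : l + 1 ≤ (p : Int) ∧ (p : Int) ≤ u
      · rw [if_pos hq, if_pos (by omega)]
      · rw [if_neg hq, if_neg (by omega),
          List.getD_eq_getElem?_getD, List.getD_eq_getElem?_getD,
          List.getElem?_set_ne (by omega)]

lemma aMark_getD (l u : Int) (hl : 1 ≤ l) (h : List Int) (p : Nat) (hu : u < (h.length : Int)) :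
    (aMark h l u).getD p 0
      = if l ≤ (p : Int) ∧ (p : Int) ≤ u then 1 else h.getD p 0 :=
  aMark_getD_aux p _ l u rfl hl h hu

lemma houses_getD (c : Int) (data : List Int) :
    ∀ (h0 : List Int), h0.length = 101 → ∀ p : Nat,
      (data.foldl (fun h i => aMark h (max 1 (i - c)) (min 100 (i + c))) h0).getD p 0
        = if covered c data (p : Int) then 1 else h0.getD p 0 := by
  induction data with
  | nil => intro h0 hlen p; simp [covered]
  | cons a t ih =>
    intro h0 hlen p
    simp only [List.foldl_cons]
    rw [ih (aMark h0 _ _) (by rw [aMark_length]; exact hlen),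
      aMark_getD _ _ (le_max_left _ _) h0 p
        (by rw [hlen]; have := min_le_left (100 : Int) (a + c); omega)]
    have hc : covered c (a :: t) (p : Int)
        = (decide (max 1 (a - c) ≤ (p:Int) ∧ (p:Int) ≤ min 100 (a + c)) || covered c t (p:Int)) := by
      simp only [covered, List.any_cons]
    rw [hc]
    by_cases hin : max 1 (a - c) ≤ (p:Int) ∧ (p:Int) ≤ min 100 (a + c)
    · rw [decide_eq_true hin, Bool.true_or]
      cases hcov : covered c t (p:Int)
      · simp [hin]
      · simp
    · rw [decide_eq_false hin, Bool.false_or, if_neg hin]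

lemma bStep_length (c : Int) (d : List Int) (i : Int) :
    (bStep c d i).length = d.length := by
  simp only [bStep]
  split
  · rw [PySem.List.length_pySetD, PySem.List.length_pySetD]
  · rfl

-- contribution of one cop to diff[j]
def contrib (c i j : Int) : Int :=
  if max 1 (i - c) ≤ min 100 (i + c)
  then (if max 1 (i - c) = j then 1 else 0) + (if min 100 (i + c) + 1 = j then -1 else 0)
  else 0

lemma bStep_getD (c : Int) (d : List Int) (hlen : d.length = 102) (i : Int) (j : Nat) :
    (bStep c d i).getD j 0 = d.getD j 0 + contrib c i (j : Int) := by
  simp only [bStep, contrib]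
  by_cases hlu : max 1 (i - c) ≤ min 100 (i + c)
  · have h1l : (1 : Int) ≤ max 1 (i - c) := le_max_left _ _
    have hu100 : min 100 (i + c) ≤ 100 := min_le_left _ _
    rw [if_pos hlu, if_pos hlu]
    rw [PySem.List.pySetD_of_nonneg _ _ (show (0:Int) ≤ max 1 (i - c) by omega),
      PySem.List.pySetD_of_nonneg _ _ (show (0:Int) ≤ min 100 (i + c) + 1 by omega),
      PySem.List.pyGetD_eq_getElem _ _ (by omega)
        (by omega),
      PySem.List.pyGetD_eq_getElem _ _ (by omega)
        (by simp only [List.length_set]; omega),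
      List.getElem_set_ne (by omega) _]
    set L : Nat := (max 1 (i - c)).toNat with hL
    set U : Nat := (min 100 (i + c) + 1).toNat with hU
    have hLlt : L < d.length := by omega
    have hUlt : U < d.length := by omega
    have hLU : L ≠ U := by omega
    by_cases hjU : j = U
    · subst hjU
      rw [List.getD_eq_getElem?_getD,
        List.getElem?_set_self (by simpa using hUlt),
        List.getD_eq_getElem?_getD, List.getElem?_eq_getElem hUlt]
      have h2 : ¬ (max 1 (i - c) = (U : Int)) := by omega
      have h3 : min 100 (i + c) + 1 = (U : Int) := by omega
      rw [if_neg h2, if_pos h3]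
      simp
      simp only [← hU]
      ring
    · rw [List.getD_eq_getElem?_getD, List.getElem?_set_ne (by omega)]
      by_cases hjL : j = L
      · subst hjL
        rw [List.getElem?_set_self hLlt,
          List.getD_eq_getElem?_getD, List.getElem?_eq_getElem hLlt]
        have h2 : max 1 (i - c) = (L : Int) := by omega
        have h3 : ¬ (min 100 (i + c) + 1 = (L : Int)) := by omega
        rw [if_pos h2, if_neg h3]
        simp
        simp only [← hL]
      · rw [List.getElem?_set_ne (by omega),
          List.getD_eq_getElem?_getD]
        have h2 : ¬ (max 1 (i - c) = (j : Int)) := by omega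
        have h3 : ¬ (min 100 (i + c) + 1 = (j : Int)) := by omega
        rw [if_neg h2, if_neg h3]
        simp
  · rw [if_neg hlu, if_neg hlu]
    simp

lemma diff_getD (c : Int) (data : List Int) :
    ∀ (d0 : List Int), d0.length = 102 → ∀ j : Nat,
      (data.foldl (bStep c) d0).getD j 0
        = d0.getD j 0 + (data.map (fun i => contrib c i (j : Int))).sum := by
  induction data with
  | nil => intro d0 hlen j; simp
  | cons a t ih =>
    intro d0 hlen j
    simp only [List.foldl_cons, List.map_cons, List.sum_cons]
    rw [ih (bStep c d0 a) (by rw [bStep_length]; exact hlen) j,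
      bStep_getD c d0 hlen a j]
    ring

lemma covCnt_step (c : Int) (data : List Int) (p : Int) :
    (covCnt c data p : Int) = (covCnt c data (p - 1) : Int) + (data.map (fun i => contrib c i p)).sum := by
  induction data with
  | nil => simp [covCnt]
  | cons a t ih =>
    simp only [covCnt, List.countP_cons, List.map_cons, List.sum_cons] at ih ⊢
    push_cast at ih ⊢
    have key : (if decide (max 1 (a - c) ≤ p ∧ p ≤ min 100 (a + c)) = true then (1 : Int) else 0)
        = (if decide (max 1 (a - c) ≤ p - 1 ∧ p - 1 ≤ min 100 (a + c)) = true then (1 : Int) else 0)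
          + contrib c a p := by
      simp only [contrib, decide_eq_true_eq]
      split_ifs <;> omega
    rw [key, ih]
    ring

lemma covCnt_zero_iff (c : Int) (data : List Int) (p : Int) :
    (covCnt c data p = 0) ↔ covered c data p = false := by
  simp [covCnt, covered, List.countP_eq_zero, List.any_eq_false]

lemma covCnt_nonpos (c : Int) (data : List Int) (p : Int) (hp : p ≤ 0) :
    covCnt c data p = 0 := by
  simp only [covCnt, List.countP_eq_zero, decide_eq_true_eq]
  intro a _ h
  omega

lemma foldA_length (c : Int) (data : List Int) :
    ∀ h0 : List Int,
      (data.foldl (fun h i => aMark h (max 1 (i - c)) (min 100 (i + c))) h0).length = h0.length := by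
  induction data with
  | nil => intro h0; rfl
  | cons a t ih => intro h0; simp only [List.foldl_cons]; rw [ih, aMark_length]

lemma sweep (c : Int) (data : List Int) (diff : List Int)
    (hdiff : ∀ j : Nat, diff.getD j 0 = (data.map (fun i => contrib c i (j : Int))).sum) :
    ∀ n : Nat, n ≤ 100 →
      (PySem.List.pyRange 1 ((n : Int) + 1) 1).foldl
        (fun st p =>
          (if st.2 + PySem.List.pyGetD diff p 0 = 0 then st.1 + 1 else st.1,
           st.2 + PySem.List.pyGetD diff p 0)) ((0 : Int), (0 : Int))
      = (((PySem.List.pyRange 1 ((n : Int) + 1) 1).countP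
            (fun q => decide (covCnt c data q = 0)) : Int),
         (covCnt c data (n : Int) : Int)) := by
  intro n
  induction n with
  | zero =>
    intro _
    rw [show ((0 : Nat) : Int) + 1 = 1 by norm_num, PySem.List.pyRange_one_eq_nil le_rfl]
    simp [covCnt_nonpos c data 0 le_rfl]
  | succ n ih =>
    intro hn
    have hsplit : PySem.List.pyRange 1 ((n.succ : Int) + 1)
        = PySem.List.pyRange 1 ((n : Int) + 1) ++ [(n : Int) + 1] := by
      push_cast
      exact PySem.List.pyRange_one_succ_right (by omega)
    rw [hsplit, List.foldl_append, ih (by omega)]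
    simp only [List.foldl_cons, List.foldl_nil, List.countP_append, List.countP_cons,
      List.countP_nil]
    have hg : PySem.List.pyGetD diff ((n : Int) + 1) 0
        = (data.map (fun i => contrib c i ((n : Int) + 1))).sum := by
      have h1 : ((n : Int) + 1) = ((n + 1 : Nat) : Int) := by push_cast; ring
      rw [h1, PySem.List.pyGetD_natCast, hdiff (n + 1)]
    have hstep := covCnt_step c data ((n : Int) + 1)
    norm_num at hstep
    rw [hg, ← hstep]
    simp only [Prod.mk.injEq]
    refine ⟨?_, by push_cast; rfl⟩
    by_cases hz : covCnt c data ((n : Int) + 1) = 0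
    · rw [if_pos (by exact_mod_cast hz), if_pos (by simp [hz])]
      push_cast
      ring
    · rw [if_neg (by simpa using hz), if_neg (by simp [hz])]
      push_cast
      ring

theorem check_safe_house_spec : Claim_equal_check_safe_house := by
  intro data x y _
  unfold Spec_check_safe_house
  simp only [check_safe_house, check_safe_house_alt]
  set c := x * y with hc
  set H := data.foldl (fun h i => aMark h (max 1 (i - c)) (min 100 (i + c)))
    (List.replicate 101 (-1 : Int)) with hH
  set Df := data.foldl (bStep c) (List.replicate 102 (0 : Int)) with hDf
  have hlenH : H.length = 101 := by rw [hH, foldA_length]; simp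
  have hA : (PySem.List.pyRange 1 101).foldl
      (fun count i => if PySem.List.pyGetD H i 0 = -1 then count + 1 else count) (0 : Int)
      = (PySem.List.pyRange 1 101).foldl
      (fun count i => if covered c data i = false then count + 1 else count) (0 : Int) := by
    refine PySem.List.foldl_congr_mem _ _ _ _ ?_
    intro acc i hi
    rw [PySem.List.mem_pyRange_one] at hi
    have h0i : (0 : Int) ≤ i := by omega
    rw [PySem.List.pyGetD_eq_getElem _ _ h0i (by rw [hlenH]; omega),
      ← List.getD_eq_getElem H 0 (by rw [hlenH]; omega),
      hH, houses_getD c data (List.replicate 101 (-1)) (by simp) i.toNat,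
      Int.toNat_of_nonneg h0i,
      List.getD_replicate (-1) (by omega : i.toNat < 101)]
    cases hcv : covered c data i
    · simp
    · simp
  rw [hA, PySem.List.foldl_ite_add_one (fun i => covered c data i = false)]
  have hdiff : ∀ j : Nat, Df.getD j 0 = (data.map (fun i => contrib c i (j : Int))).sum := by
    intro j
    rw [hDf, diff_getD c data _ (by simp) j]
    have hz : (List.replicate 102 (0 : Int)).getD j 0 = 0 := by
      rcases lt_or_ge j 102 with h | h
      · rw [List.getD_replicate _ h]
      · rw [List.getD_eq_default _ _ (by simpa using h)]
    rw [hz]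
    ring
  have hs := sweep c data Df hdiff 100 le_rfl
  have e : ((100 : Nat) : Int) + 1 = 101 := by norm_num
  rw [e] at hs
  rw [hs]
  have hcnt : (PySem.List.pyRange 1 101).countP (fun q => decide (covCnt c data q = 0))
      = (PySem.List.pyRange 1 101).countP (fun i => decide (covered c data i = false)) := by
    refine List.countP_congr ?_
    intro q _
    simp only [decide_eq_true_eq]
    exact covCnt_zero_iff c data q
  simp only [hcnt]
  omega
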